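-- pv_equiv track=rewrite | github.com/Mr-Rajesh-108/problem_solving_DSA | Problem_of_Day/day_15/SumString.py | check_sum_string
-- ===== SOURCE A (Python) =====
-- def isValidNumber(s):
--     return not (s.startswith('0') and len(s) > 1)
--
-- def add_str_nums(a, b):
--     return str(int(a) + int(b))
--
-- def check_sum_string(s, start, len1, len2):
--     num1 = s[start:start + len1]
--     num2 = s[start + len1:start + len1 + len2]
--
--     if not isValidNumber(num1) or not isValidNumber(num2):
--         return False
--
--     while start + len1 + len2 < len(s):
--         sum_str = add_str_nums(num1, num2)
--         sum_len = len(sum_str)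
--
--         next_start = start + len1 + len2
--         next_end = next_start + sum_len
--
--         if next_end > len(s) or s[next_start:next_end] != sum_str:
--             return False
--
--         num1, num2 = num2, sum_str
--         start = start + len1
--         len1, len2 = len2, sum_len
--
--     return True
-- ===== SOURCE B (Python) =====
-- def isValidNumber(s):
--     return not (s.startswith('0') and len(s) > 1)
--
-- def check_sum_string(s, start, len1, len2):
--     num1 = s[start:start + len1]
--     num2 = s[start + len1:start + len1 + len2]
--
--     if not isValidNumber(num1) or not isValidNumber(num2):
--         return False
--
--     # Build the expected continuation once and compare with one equality test.
--     target = s[start:]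
--     built = num1 + num2
--     while len(built) < len(target):
--         nxt = str(int(num1) + int(num2))
--         built += nxt
--         num1, num2 = num2, nxt
--     return built == target
-- ===== Notes on version B (the rewrite author's own statement) =====
-- stated objective: alternative
-- what changed: Instead of A's positional chunk-by-chunk verification (slice, bound-check and compare each successive sum against the string, with early exit), B constructs the expected tail once (built = num1+num2 extended by successive sums until it reaches the tail's length) and decides with a single string equality against s[start:].
-- outside the precondition, e.g. on check_sum_string('1772424', -1, 6, 5): A returns True, B returns False; on check_sum_string('24832', 5, -3, 4): A returns True, B returns False
import Mathlib
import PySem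

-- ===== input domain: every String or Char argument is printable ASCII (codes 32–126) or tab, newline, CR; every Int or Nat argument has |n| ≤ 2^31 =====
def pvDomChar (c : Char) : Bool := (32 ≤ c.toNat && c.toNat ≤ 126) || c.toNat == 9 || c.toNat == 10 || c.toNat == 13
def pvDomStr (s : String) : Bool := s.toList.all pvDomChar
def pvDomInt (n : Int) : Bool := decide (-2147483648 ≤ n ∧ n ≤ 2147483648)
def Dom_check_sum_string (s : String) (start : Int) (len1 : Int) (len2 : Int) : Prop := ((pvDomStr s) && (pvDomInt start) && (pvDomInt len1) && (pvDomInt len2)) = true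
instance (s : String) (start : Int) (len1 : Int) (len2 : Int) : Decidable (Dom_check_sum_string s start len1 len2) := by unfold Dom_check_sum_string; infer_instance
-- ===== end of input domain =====

-- B replaces A's positional chunk-by-chunk verification by constructing the expected tail
-- once and deciding with a single string equality (objective: alternative, not faster).

-- ===== PORT A =====
def pvIsValidNumber (cs : List Char) : Bool :=
  !(PySem.Chars.startswith cs ['0'] && decide (1 < cs.length))
def pvAddStrNums? (a b : List Char) : Option (List Char) :=
  match PySem.Int.ofChars? a, PySem.Int.ofChars? b with
  | some x, some y => some (PySem.Int.toChars (x + y))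
  | _, _ => none
def pvALoop (cs : List Char) : Nat → List Char → List Char → Int → Int → Int → Bool
  | 0, _, _, _, _, _ => false
  | fuel+1, num1, num2, start, len1, len2 =>
    if start + len1 + len2 < (cs.length : Int) then
      match pvAddStrNums? num1 num2 with
      | none => false
      | some sum_str =>
        let sum_len : Int := (sum_str.length : Int)
        let next_start := start + len1 + len2
        let next_end := next_start + sum_len
        if (cs.length : Int) < next_end ∨ PySem.List.slice cs (some next_start) (some next_end) ≠ sum_str then
          false
        else
          pvALoop cs fuel num2 sum_str (start + len1) len2 sum_len
    else true
def check_sum_string (s : String) (start : Int) (len1 : Int) (len2 : Int) : Bool :=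
  let cs := s.toList
  let num1 := PySem.List.slice cs (some start) (some (start + len1))
  let num2 := PySem.List.slice cs (some (start + len1)) (some (start + len1 + len2))
  if !pvIsValidNumber num1 || !pvIsValidNumber num2 then false
  else pvALoop cs (cs.length + 1) num1 num2 start len1 len2
-- ===== PORT B =====
def pvBLoop : Nat → List Char → List Char → List Char → List Char → Bool
  | 0, _, _, _, _ => false
  | fuel+1, built, num1, num2, target =>
    if built.length < target.length then
      match pvAddStrNums? num1 num2 with
      | none => false
      | some nxt => pvBLoop fuel (built ++ nxt) num2 nxt target
    else built == target
def check_sum_string_alt (s : String) (start : Int) (len1 : Int) (len2 : Int) : Bool :=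
  let cs := s.toList
  let num1 := PySem.List.slice cs (some start) (some (start + len1))
  let num2 := PySem.List.slice cs (some (start + len1)) (some (start + len1 + len2))
  if !pvIsValidNumber num1 || !pvIsValidNumber num2 then false
  else
    let target := PySem.List.slice cs (some start) none
    pvBLoop (cs.length + 1) (num1 ++ num2) num1 num2 target
-- ===== PRECONDITION & SPEC =====
-- Outside Pre_ A either RAISES ValueError (int() of an unparsable first or second
-- slice, reachable only on the first loop iteration: later operands are generated sum
-- strings) or has negative slice parameters, whose Python wraparound/empty-slice
-- accidents are outside the problem's natural domain; those negative-parameter inputs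
-- on which A still returns are the only returning inputs excluded.  Admitted:
-- (1) no-loop inputs (the first two numbers exhaust the string) with nonnegative
-- parameters, (2) inputs rejected by the leading-zero guard, (3) nonnegative
-- parameters with both initial slices parsable by int().
def Pre_check_sum_string (s : String) (start : Int) (len1 : Int) (len2 : Int) : Prop :=
  (0 ≤ start ∧ 0 ≤ len1 ∧ 0 ≤ len2 ∧ (s.toList.length : Int) ≤ start + len1 + len2)
  ∨ (let n1 := PySem.List.slice s.toList (some start) (some (start + len1))
     n1.head? = some '0' ∧ 2 ≤ n1.length)
  ∨ (let n2 := PySem.List.slice s.toList (some (start + len1)) (some (start + len1 + len2))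
     n2.head? = some '0' ∧ 2 ≤ n2.length)
  ∨ (0 ≤ start ∧ 0 ≤ len1 ∧ 0 ≤ len2
     ∧ (PySem.Int.ofChars? (PySem.List.slice s.toList (some start) (some (start + len1)))).isSome
     ∧ (PySem.Int.ofChars? (PySem.List.slice s.toList (some (start + len1)) (some (start + len1 + len2)))).isSome)
instance (s : String) (start : Int) (len1 : Int) (len2 : Int) : Decidable (Pre_check_sum_string s start len1 len2) := by unfold Pre_check_sum_string; infer_instance

def pvWitness_check_sum_string : String × Int × Int × Int := ("1123", 0, 1, 1)

def Spec_check_sum_string (s : String) (start : Int) (len1 : Int) (len2 : Int) (out : Bool) : Prop := out = check_sum_string_alt s start len1 len2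
instance (s : String) (start : Int) (len1 : Int) (len2 : Int) (out : Bool) : Decidable (Spec_check_sum_string s start len1 len2 out) := by unfold Spec_check_sum_string; infer_instance

-- ===== CLAIM (what is proved, stated in full; the proofs are below) =====
def Claim_equal_check_sum_string : Prop := ∀ (s : String) (start : Int) (len1 : Int) (len2 : Int), Dom_check_sum_string s start len1 len2 → Pre_check_sum_string s start len1 len2 → Spec_check_sum_string s start len1 len2 (check_sum_string s start len1 len2)

-- ===== LEMMAS AND PROOFS =====
theorem pv_take_drop_chain {α : Type} (xs : List α) (a m k : Nat) :
    (xs.drop a).take m ++ (xs.drop (a + m)).take k = (xs.drop a).take (m + k) := by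
  rw [List.take_add, ← List.drop_drop]
theorem pvBLoop_false (fuel : Nat) (built num1 num2 target : List Char)
    (h : ¬ built <+: target) : pvBLoop fuel built num1 num2 target = false := by
  induction fuel generalizing built num1 num2 with
  | zero => rfl
  | succ f ih =>
    simp only [pvBLoop]
    split
    · cases hadd : pvAddStrNums? num1 num2 with
      | none => rfl
      | some nxt =>
        exact ih (built ++ nxt) num2 nxt fun hp => h ((List.prefix_append built nxt).trans hp)
    · simp only [beq_eq_false_iff_ne, ne_eq]
      rintro rfl
      exact h List.prefix_rfl
theorem pvValid_false_iff (cs : List Char) :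
    pvIsValidNumber cs = false ↔ (cs.head? = some '0' ∧ 2 ≤ cs.length) := by
  have hsw : PySem.Chars.startswith cs ['0'] = true ↔ ['0'] <+: cs := PySem.Chars.startswith_iff cs ['0']
  cases cs with
  | nil =>
    simp only [List.prefix_nil] at hsw
    simp only [pvIsValidNumber, List.head?_nil, List.length_nil, Bool.not_eq_false',
      Bool.and_eq_true, hsw]
    simp
  | cons c t =>
    simp only [List.cons_prefix_cons, List.nil_prefix, and_true] at hsw
    simp only [pvIsValidNumber, List.head?_cons, List.length_cons, Bool.not_eq_false',
      Bool.and_eq_true, hsw, decide_eq_true_eq, Option.some_inj]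
    constructor
    · rintro ⟨rfl, h⟩; exact ⟨rfl, by omega⟩
    · rintro ⟨rfl, h⟩; exact ⟨rfl, by omega⟩
theorem pvLockstep (cs : List Char) (s0 : Nat) :
    ∀ (fuel : Nat) (num1 num2 : List Char) (a l1 l2 : Nat), s0 ≤ a → a + l1 + l2 ≤ cs.length →
    pvALoop cs fuel num1 num2 (a : Int) (l1 : Int) (l2 : Int)
      = pvBLoop fuel ((cs.drop s0).take (a + l1 + l2 - s0)) num1 num2 (cs.drop s0) := by
  intro fuel
  induction fuel with
  | zero => intro _ _ _ _ _ _ _; rfl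
  | succ f ih =>
    intro num1 num2 a l1 l2 hs0 hle
    simp only [pvALoop, pvBLoop]
    have hlenb : ((cs.drop s0).take (a + l1 + l2 - s0)).length = a + l1 + l2 - s0 := by
      simp [List.length_take, List.length_drop]; omega
    by_cases hlt : a + l1 + l2 < cs.length
    · have hA : (a : Int) + (l1 : Int) + (l2 : Int) < (cs.length : Int) := by exact_mod_cast hlt
      have hB : ((cs.drop s0).take (a + l1 + l2 - s0)).length < (cs.drop s0).length := by
        rw [hlenb, List.length_drop]; omega
      rw [if_pos hA, if_pos hB]
      cases hadd : pvAddStrNums? num1 num2 with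
      | none => rfl
      | some nxt =>
        simp only []
        have hbuilt_take : ∀ k : Nat,
            (cs.drop s0).take (a + l1 + l2 - s0) ++ (cs.drop (a + l1 + l2)).take k
              = (cs.drop s0).take (a + l1 + l2 - s0 + k) := by
          intro k
          have := pv_take_drop_chain cs s0 (a + l1 + l2 - s0) k
          rwa [show s0 + (a + l1 + l2 - s0) = a + l1 + l2 by omega] at this
        by_cases hfail : (cs.length : Int) < ((a : Int) + l1 + l2 + (nxt.length : Int)) ∨
            PySem.List.slice cs (some ((a : Int) + l1 + l2)) (some ((a : Int) + l1 + l2 + (nxt.length : Int))) ≠ nxt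
        · rw [if_pos hfail]
          symm
          apply pvBLoop_false
          intro hpre
          have hlenp := hpre.length_le
          rw [List.length_append, hlenb, List.length_drop] at hlenp
          have hne : a + l1 + l2 + nxt.length ≤ cs.length := by omega
          have hslice : PySem.List.slice cs (some ((a : Int) + l1 + l2))
              (some ((a : Int) + l1 + l2 + (nxt.length : Int))) = (cs.drop (a + l1 + l2)).take nxt.length := by
            have := PySem.List.slice_natCast_add cs (a + l1 + l2) nxt.length
            rw [← this]; push_cast; ring_nf
          have heq : (cs.drop s0).take (a + l1 + l2 - s0) ++ nxt
              = (cs.drop s0).take (a + l1 + l2 - s0) ++ (cs.drop (a + l1 + l2)).take nxt.length := by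
            rw [hbuilt_take]
            have := List.prefix_iff_eq_take.mp hpre
            rw [List.length_append, hlenb] at this
            exact this
          have hchunk : nxt = (cs.drop (a + l1 + l2)).take nxt.length :=
            List.append_cancel_left heq
          rcases hfail with hfail | hfail
          · have : (a : Int) + l1 + l2 + (nxt.length : Int) ≤ (cs.length : Int) := by exact_mod_cast hne
            omega
          · exact hfail (hslice.trans hchunk.symm)
        · rw [if_neg hfail]
          rw [not_or, not_lt, ne_eq, not_not] at hfail
          obtain ⟨hne, hchunk⟩ := hfail
          have hne' : a + l1 + l2 + nxt.length ≤ cs.length := by exact_mod_cast hne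
          have hslice : PySem.List.slice cs (some ((a : Int) + l1 + l2))
              (some ((a : Int) + l1 + l2 + (nxt.length : Int))) = (cs.drop (a + l1 + l2)).take nxt.length := by
            have := PySem.List.slice_natCast_add cs (a + l1 + l2) nxt.length
            rw [← this]; push_cast; ring_nf
          have hrec := ih num2 nxt (a + l1) l2 nxt.length (by omega) (by omega)
          have hcast1 : (a : Int) + (l1 : Int) = ((a + l1 : Nat) : Int) := by push_cast; ring
          rw [hcast1, hrec]
          congr 1
          rw [show a + l1 + l2 + nxt.length - s0 = a + l1 + l2 - s0 + nxt.length by omega,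
            ← hbuilt_take nxt.length, ← hslice, hchunk]
    · have hA : ¬ ((a : Int) + (l1 : Int) + (l2 : Int) < (cs.length : Int)) := by
        rw [not_lt]; exact_mod_cast Nat.le_of_not_lt hlt
      have hB : ¬ ((cs.drop s0).take (a + l1 + l2 - s0)).length < (cs.drop s0).length := by
        rw [hlenb, List.length_drop]; omega
      rw [if_neg hA, if_neg hB]
      have : (cs.drop s0).take (a + l1 + l2 - s0) = cs.drop s0 := by
        apply List.take_of_length_le
        rw [List.length_drop]; omega
      rw [this, beq_self_eq_true]

-- ===== VERDICT (by name: the statement is the Claim_ definition above) =====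
theorem check_sum_string_spec : Claim_equal_check_sum_string := by
  intro s start len1 len2 _ hpre
  unfold Spec_check_sum_string check_sum_string check_sum_string_alt
  simp only []
  by_cases hg : (!pvIsValidNumber (PySem.List.slice s.toList (some start) (some (start + len1))) ||
      !pvIsValidNumber (PySem.List.slice s.toList (some (start + len1)) (some (start + len1 + len2)))) = true
  · rw [if_pos hg, if_pos hg]
  · rw [if_neg hg, if_neg hg]
    -- the guard passed: both numbers are valid
    simp only [Bool.or_eq_true, not_or, Bool.not_eq_true, Bool.not_eq_false'] at hg
    obtain ⟨hg1, hg2⟩ := hg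
    -- dispatch the two guard-failure disjuncts of Pre_
    have hnn : 0 ≤ start ∧ 0 ≤ len1 ∧ 0 ≤ len2 := by
      rcases hpre with ⟨h1, h2, h3, _⟩ | hd | hd | ⟨h1, h2, h3, _, _⟩
      · exact ⟨h1, h2, h3⟩
      · exact absurd ((pvValid_false_iff _).mpr hd) (by simp [hg1])
      · exact absurd ((pvValid_false_iff _).mpr hd) (by simp [hg2])
      · exact ⟨h1, h2, h3⟩
    obtain ⟨hs0, hl10, hl20⟩ := hnn
    set cs := s.toList with hcs
    obtain ⟨a, rfl⟩ : ∃ a : Nat, start = (a : Int) := ⟨start.toNat, (Int.toNat_of_nonneg hs0).symm⟩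
    obtain ⟨l1, rfl⟩ : ∃ l1 : Nat, len1 = (l1 : Int) := ⟨len1.toNat, (Int.toNat_of_nonneg hl10).symm⟩
    obtain ⟨l2, rfl⟩ : ∃ l2 : Nat, len2 = (l2 : Int) := ⟨len2.toNat, (Int.toNat_of_nonneg hl20).symm⟩
    have e1 : PySem.List.slice cs (some (a : Int)) (some ((a : Int) + (l1 : Int))) = (cs.drop a).take l1 :=
      PySem.List.slice_natCast_add cs a l1
    have e2 : PySem.List.slice cs (some ((a : Int) + (l1 : Int))) (some ((a : Int) + (l1 : Int) + (l2 : Int)))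
        = (cs.drop (a + l1)).take l2 := by
      have := PySem.List.slice_natCast_add cs (a + l1) l2
      rw [← this]; push_cast; ring_nf
    have etgt : PySem.List.slice cs (some (a : Int)) none = cs.drop a :=
      PySem.List.slice_from_natCast cs a
    have ebuilt : (cs.drop a).take l1 ++ (cs.drop (a + l1)).take l2 = (cs.drop a).take (l1 + l2) :=
      pv_take_drop_chain cs a l1 l2
    rw [e1, e2, etgt, ebuilt]
    by_cases hll : a + l1 + l2 ≤ cs.length
    · have := pvLockstep cs a (cs.length + 1) ((cs.drop a).take l1) ((cs.drop (a + l1)).take l2) a l1 l2 le_rfl hll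
      rw [show a + l1 + l2 - a = l1 + l2 by omega] at this
      exact this
    · -- the first two numbers already exhaust the string: A's loop does not run
      have hA : ¬ ((a : Int) + (l1 : Int) + (l2 : Int) < (cs.length : Int)) := by
        rw [not_lt]; exact_mod_cast show cs.length ≤ a + l1 + l2 by omega
      have htail : (cs.drop a).take (l1 + l2) = cs.drop a := by
        apply List.take_of_length_le
        rw [List.length_drop]; omega
      simp [pvALoop, pvBLoop, if_neg hA, htail]
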